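-- pv_equiv track=rewrite | github.com/huikinglam02gmail/Leetcode_solutions | 2866.beautiful-towers-ii.py | beautifulTowersPrefixSum
-- ===== SOURCE A (Python) =====
-- from typing import List
--
-- def beautifulTowersPrefixSum(maxHeights: List[int]) -> int:
--     left = []
--     stack = [-1]
--     prefixSum = 0
--     for i in range(len(maxHeights)):
--         while stack[-1] >= 0 and maxHeights[stack[-1]] >= maxHeights[i]:
--             j = stack.pop()
--             prefixSum -= maxHeights[j] * (j - stack[-1])
--         prefixSum += maxHeights[i] * (i - stack[-1])
--         stack.append(i)
--         left.append(prefixSum)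
--     return left
-- ===== SOURCE B (Python) =====
-- from typing import List
--
-- def beautifulTowersPrefixSum(maxHeights: List[int]) -> int:
--     # Pointer-jumping previous-smaller table + flat dp pass (no running stack/prefix-sum).
--     n = len(maxHeights)
--     prev = []
--     for i in range(n):
--         j = i - 1
--         while j >= 0 and maxHeights[j] >= maxHeights[i]:
--             j = prev[j]
--         prev.append(j)
--     dp = []
--     for i in range(n):
--         p = prev[i]
--         dp.append((dp[p] if p >= 0 else 0) + maxHeights[i] * (i - p))
--     return dp
-- ===== Notes on version B (the rewrite author's own statement) =====
-- stated objective: alternative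
-- what changed: A interleaves a sentinel monotonic stack with pop-time prefix-sum subtraction in one loop; B has no stack and no running sum: a first pass computes the previous-strictly-smaller table by pointer-jumping through already-computed prev links, and a second flat pass fills dp[i] = dp[prev[i]] + maxHeights[i]*(i - prev[i]).
import Mathlib
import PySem

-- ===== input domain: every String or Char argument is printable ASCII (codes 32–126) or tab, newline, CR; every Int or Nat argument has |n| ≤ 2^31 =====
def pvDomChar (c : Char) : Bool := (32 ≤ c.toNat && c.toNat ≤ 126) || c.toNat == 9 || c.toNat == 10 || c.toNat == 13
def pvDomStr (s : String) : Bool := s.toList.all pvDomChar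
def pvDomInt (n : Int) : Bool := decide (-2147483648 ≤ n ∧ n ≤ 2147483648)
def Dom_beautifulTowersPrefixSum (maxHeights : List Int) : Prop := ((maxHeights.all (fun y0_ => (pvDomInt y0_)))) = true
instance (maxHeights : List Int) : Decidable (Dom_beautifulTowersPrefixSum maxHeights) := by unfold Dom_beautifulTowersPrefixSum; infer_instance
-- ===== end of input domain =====

-- B replaces A's interleaved monotonic stack + running prefix sum by a pointer-jumping
-- previous-smaller table followed by a flat dp pass (alternative decomposition, same cost).


-- ===== PORT A =====
-- the inner 'while' loop: pop while stack[-1] >= 0 and maxHeights[stack[-1]] >= hi,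
-- subtracting the popped segment from prefixSum (stack head = Python's stack[-1];
-- the [] case and the headD default are unreachable: the sentinel -1 is never popped)
def pvPopA (h : List Int) (hi : Int) : List Int → Int → List Int × Int
  | [], ps => ([], ps)
  | top :: rest, ps =>
    if top ≥ 0 ∧ (PySem.List.pyGet? h top).getD 0 ≥ hi then
      pvPopA h hi rest (ps - (PySem.List.pyGet? h top).getD 0 * (top - rest.headD (-1)))
    else (top :: rest, ps)

-- one iteration of A's 'for i in range(len(maxHeights))' over state (stack, prefixSum, left)
def pvStepA (h : List Int) (st : List Int × Int × List Int) (i : Int) : List Int × Int × List Int :=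
  let hi := (PySem.List.pyGet? h i).getD 0
  let popped := pvPopA h hi st.1 st.2.1
  let ps := popped.2 + hi * (i - popped.1.headD (-1))
  (i :: popped.1, ps, st.2.2 ++ [ps])

def beautifulTowersPrefixSum (maxHeights : List Int) : List Int :=
  ((PySem.List.pyRange 0 maxHeights.length 1).foldl (pvStepA maxHeights) ([-1], 0, [])).2.2

-- ===== PORT B =====
-- B's inner 'while j >= 0 and maxHeights[j] >= hi: j = prev[j]' loop; fuel only makes the
-- recursion structural (prev entries strictly decrease, so fuel = len(maxHeights) never runs out)
def pvJumpB (h prev : List Int) (hi : Int) : Nat → Int → Int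
  | 0, j => j
  | fuel+1, j =>
    if j ≥ 0 ∧ (PySem.List.pyGet? h j).getD 0 ≥ hi then
      pvJumpB h prev hi fuel ((PySem.List.pyGet? prev j).getD (-1))
    else j

-- pass 1: prev.append(j) for each i
def pvStepPrev (h : List Int) (prev : List Int) (i : Int) : List Int :=
  prev ++ [pvJumpB h prev ((PySem.List.pyGet? h i).getD 0) h.length (i - 1)]

def pvPrevB (h : List Int) : List Int :=
  (PySem.List.pyRange 0 h.length 1).foldl (pvStepPrev h) []

-- pass 2: dp.append((dp[p] if p >= 0 else 0) + maxHeights[i]*(i - p))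
def pvStepDp (h prev : List Int) (dp : List Int) (i : Int) : List Int :=
  let p := (PySem.List.pyGet? prev i).getD (-1)
  dp ++ [(if p ≥ 0 then (PySem.List.pyGet? dp p).getD 0 else 0) +
         (PySem.List.pyGet? h i).getD 0 * (i - p)]

def beautifulTowersPrefixSum_alt (maxHeights : List Int) : List Int :=
  (PySem.List.pyRange 0 maxHeights.length 1).foldl
    (pvStepDp maxHeights (pvPrevB maxHeights)) []

-- ===== PRECONDITION & SPEC =====
def Spec_beautifulTowersPrefixSum (maxHeights : List Int) (out : List Int) : Prop := out = beautifulTowersPrefixSum_alt maxHeights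
instance (maxHeights : List Int) (out : List Int) : Decidable (Spec_beautifulTowersPrefixSum maxHeights out) := by unfold Spec_beautifulTowersPrefixSum; infer_instance

-- ===== CLAIM (what is proved, stated in full; the proofs are below) =====
def Claim_equal_beautifulTowersPrefixSum : Prop := ∀ (maxHeights : List Int), Dom_beautifulTowersPrefixSum maxHeights → Spec_beautifulTowersPrefixSum maxHeights (beautifulTowersPrefixSum maxHeights)

-- ===== LEMMAS AND PROOFS =====

-- prev[t] as B reads it (default unreachable)
def pvPAt (prev : List Int) (t : Int) : Int := (PySem.List.pyGet? prev t).getD (-1)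

lemma pvPAt_def (prev : List Int) (t : Int) :
    (PySem.List.pyGet? prev t).getD (-1) = pvPAt prev t := rfl

-- invariant of the prev table: every entry is ≥ -1 and smaller than its index
def pvGood (prev : List Int) : Prop :=
  ∀ k : Nat, k < prev.length → -1 ≤ pvPAt prev (k : Int) ∧ pvPAt prev (k : Int) < (k : Int)

-- the chain t, prev[t], prev[prev[t]], …, -1 (A's stack contents, top first)
def pvChain (prev : List Int) : Nat → Int → List Int
  | 0, _ => [-1]
  | f+1, t => if 0 ≤ t then t :: pvChain prev f (pvPAt prev t) else [-1]

-- A's prefixSum as a function of the stack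
def pvS (h : List Int) : List Int → Int
  | j :: b :: rest => pvS h (b :: rest) + (PySem.List.pyGet? h j).getD 0 * (j - b)
  | _ => 0

-- partial folds
def pvAAux (h : List Int) (k : Nat) : List Int × Int × List Int :=
  (PySem.List.pyRange 0 (k : Int) 1).foldl (pvStepA h) ([-1], 0, [])
def pvPrevAux (h : List Int) (k : Nat) : List Int :=
  (PySem.List.pyRange 0 (k : Int) 1).foldl (pvStepPrev h) []
def pvBAux (h prev : List Int) (k : Nat) : List Int :=
  (PySem.List.pyRange 0 (k : Int) 1).foldl (pvStepDp h prev) []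

lemma pvPAt_append (prev ext : List Int) (t : Int) (h0 : 0 ≤ t) (h1 : t < (prev.length : Int)) :
    pvPAt (prev ++ ext) t = pvPAt prev t := by
  unfold pvPAt
  rw [PySem.List.pyGet?_of_nonneg _ h0, PySem.List.pyGet?_of_nonneg _ h0,
      List.getElem?_append_left (by omega)]

lemma pvGood_at {prev : List Int} (hg : pvGood prev) {t : Int} (h0 : 0 ≤ t)
    (h1 : t < (prev.length : Int)) : -1 ≤ pvPAt prev t ∧ pvPAt prev t < t := by
  have := hg t.toNat (by omega)
  rw [Int.toNat_of_nonneg h0] at this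
  omega

lemma pvJumpB_neg (h prev : List Int) (hi : Int) (f : Nat) (t : Int) (ht : t < 0) :
    pvJumpB h prev hi f t = t := by
  cases f with
  | zero => rfl
  | succ f => simp only [pvJumpB]; rw [if_neg]; omega

lemma pvJumpB_append (h prev ext : List Int) (hi : Int) :
    ∀ (f : Nat) (t : Int), pvGood prev → (0 ≤ t → t < (prev.length : Int)) →
    pvJumpB h (prev ++ ext) hi f t = pvJumpB h prev hi f t := by
  intro f
  induction f with
  | zero => intro t _ _; rfl
  | succ f ih =>
    intro t hg hlt
    simp only [pvJumpB]
    by_cases hc : t ≥ 0 ∧ (PySem.List.pyGet? h t).getD 0 ≥ hi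
    · rw [if_pos hc, if_pos hc]
      have hl := hlt hc.1
      have hpa := pvPAt_append prev ext t hc.1 hl
      unfold pvPAt at hpa
      rw [hpa]
      have hb := pvGood_at hg hc.1 hl
      unfold pvPAt at hb
      exact ih _ hg (fun h0 => by omega)
    · rw [if_neg hc, if_neg hc]

lemma pvJumpB_bounds (h prev : List Int) (hi : Int) :
    ∀ (f : Nat) (t : Int), pvGood prev → -1 ≤ t → (0 ≤ t → t < (prev.length : Int)) →
    -1 ≤ pvJumpB h prev hi f t ∧ pvJumpB h prev hi f t ≤ t := by
  intro f
  induction f with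
  | zero => intro t _ h1 _; exact ⟨h1, le_rfl⟩
  | succ f ih =>
    intro t hg h1 h2
    simp only [pvJumpB]
    by_cases hc : t ≥ 0 ∧ (PySem.List.pyGet? h t).getD 0 ≥ hi
    · rw [if_pos hc]
      have hb := pvGood_at hg hc.1 (h2 hc.1)
      unfold pvPAt at hb
      have hl := h2 hc.1
      have := ih ((PySem.List.pyGet? prev t).getD (-1)) hg (by omega) (fun h0 => by omega)
      exact ⟨this.1, by omega⟩
    · rw [if_neg hc]; exact ⟨h1, le_rfl⟩

lemma pvJumpB_fuel (h prev : List Int) (hi : Int) :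
    ∀ (f g : Nat) (t : Int), pvGood prev →
    (0 ≤ t → t < (prev.length : Int) ∧ t.toNat < f ∧ t.toNat < g) →
    pvJumpB h prev hi f t = pvJumpB h prev hi g t := by
  intro f
  induction f with
  | zero =>
    intro g t hg hb
    have ht : t < 0 := by by_contra hx; push_neg at hx; have := hb hx; omega
    rw [pvJumpB_neg _ _ _ _ _ ht, pvJumpB_neg _ _ _ _ _ ht]
  | succ f ih =>
    intro g t hg hb
    by_cases ht : t < 0
    · rw [pvJumpB_neg _ _ _ _ _ ht, pvJumpB_neg _ _ _ _ _ ht]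
    · push_neg at ht
      obtain ⟨hlen, hf, hgf⟩ := hb ht
      obtain ⟨g', rfl⟩ : ∃ g', g = g' + 1 := ⟨g - 1, by omega⟩
      simp only [pvJumpB]
      by_cases hc : t ≥ 0 ∧ (PySem.List.pyGet? h t).getD 0 ≥ hi
      · rw [if_pos hc, if_pos hc]
        have hpb := pvGood_at hg ht hlen
        unfold pvPAt at hpb
        by_cases ht' : (PySem.List.pyGet? prev t).getD (-1) < 0
        · rw [pvJumpB_neg _ _ _ _ _ ht', pvJumpB_neg _ _ _ _ _ ht']
        · push_neg at ht'
          exact ih g' _ hg (fun _ => ⟨by omega, by omega, by omega⟩)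
      · rw [if_neg hc, if_neg hc]

lemma pvChain_neg (prev : List Int) (f : Nat) (t : Int) (ht : t < 0) :
    pvChain prev f t = [-1] := by
  cases f with
  | zero => rfl
  | succ f => simp only [pvChain]; rw [if_neg]; omega

lemma pvChain_fuel (prev : List Int) :
    ∀ (f g : Nat) (t : Int), pvGood prev →
    (0 ≤ t → t < (prev.length : Int) ∧ t.toNat < f ∧ t.toNat < g) →
    pvChain prev f t = pvChain prev g t := by
  intro f
  induction f with
  | zero =>
    intro g t hg hb
    have ht : t < 0 := by by_contra hx; push_neg at hx; have := hb hx; omega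
    rw [pvChain_neg _ _ _ ht, pvChain_neg _ _ _ ht]
  | succ f ih =>
    intro g t hg hb
    by_cases ht : t < 0
    · rw [pvChain_neg _ _ _ ht, pvChain_neg _ _ _ ht]
    · push_neg at ht
      obtain ⟨hlen, hf, hgf⟩ := hb ht
      obtain ⟨g', rfl⟩ : ∃ g', g = g' + 1 := ⟨g - 1, by omega⟩
      simp only [pvChain]
      rw [if_pos ht, if_pos ht]
      have hpb := pvGood_at hg ht hlen
      by_cases ht' : pvPAt prev t < 0
      · rw [pvChain_neg _ _ _ ht', pvChain_neg _ _ _ ht']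
      · push_neg at ht'
        rw [ih g' _ hg (fun _ => ⟨by omega, by omega, by omega⟩)]

lemma pvChain_headD (prev : List Int) (f : Nat) (t : Int) (ht : -1 ≤ t)
    (hf : 0 ≤ t → t.toNat < f) : (pvChain prev f t).headD (-1) = t := by
  by_cases ht0 : t < 0
  · have : t = -1 := by omega
    subst this
    rw [pvChain_neg _ _ _ (by omega)]; rfl
  · push_neg at ht0
    have hf' := hf ht0
    obtain ⟨f', rfl⟩ : ∃ f', f = f' + 1 := ⟨f - 1, by omega⟩
    simp only [pvChain]
    rw [if_pos ht0]
    rfl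

lemma pvS_chain_cons (h prev : List Int) (f : Nat) (t p : Int) (hp : -1 ≤ p)
    (hf : 0 ≤ p → p.toNat < f) :
    pvS h (t :: pvChain prev f p)
      = pvS h (pvChain prev f p) + (PySem.List.pyGet? h t).getD 0 * (t - p) := by
  by_cases hp0 : p < 0
  · have : p = -1 := by omega
    subst this
    rw [pvChain_neg _ _ _ (by omega)]
    simp [pvS]
  · push_neg at hp0
    obtain ⟨f', rfl⟩ : ∃ f', f = f' + 1 := ⟨f - 1, by have := hf hp0; omega⟩
    simp only [pvChain]
    rw [if_pos hp0]
    rfl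

lemma pvPopA_chain (h prev : List Int) (hi : Int) :
    ∀ (f : Nat) (t : Int), pvGood prev → -1 ≤ t →
    (0 ≤ t → t < (prev.length : Int) ∧ t.toNat < f) →
    pvPopA h hi (pvChain prev f t) (pvS h (pvChain prev f t))
      = (pvChain prev f (pvJumpB h prev hi f t),
         pvS h (pvChain prev f (pvJumpB h prev hi f t))) := by
  intro f
  induction f with
  | zero =>
    intro t hg ht hb
    have ht0 : t < 0 := by by_contra hx; push_neg at hx; have := hb hx; omega
    simp only [pvChain, pvPopA]
    rw [if_neg (by intro hcon; exact absurd hcon.1 (by norm_num))]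
  | succ f ih =>
    intro t hg ht hb
    by_cases ht0 : t < 0
    · rw [pvChain_neg _ _ _ ht0, pvJumpB_neg _ _ _ _ _ ht0, pvChain_neg _ _ _ ht0]
      simp only [pvPopA]
      rw [if_neg (by intro hcon; exact absurd hcon.1 (by norm_num))]
    · push_neg at ht0
      obtain ⟨hlen, hfu⟩ := hb ht0
      have hpb := pvGood_at hg ht0 hlen
      have hchain : pvChain prev (f+1) t = t :: pvChain prev f (pvPAt prev t) := by
        simp only [pvChain]; rw [if_pos ht0]
      rw [hchain]
      by_cases hc : t ≥ 0 ∧ (PySem.List.pyGet? h t).getD 0 ≥ hi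
      · have hhead : (pvChain prev f (pvPAt prev t)).headD (-1) = pvPAt prev t :=
          pvChain_headD prev f _ hpb.1 (fun h0 => by omega)
        have hS : pvS h (t :: pvChain prev f (pvPAt prev t))
            = pvS h (pvChain prev f (pvPAt prev t))
              + (PySem.List.pyGet? h t).getD 0 * (t - pvPAt prev t) :=
          pvS_chain_cons h prev f t _ hpb.1 (fun h0 => by omega)
        have hjump : pvJumpB h prev hi (f+1) t = pvJumpB h prev hi f (pvPAt prev t) := by
          simp only [pvJumpB]; rw [if_pos hc]; rfl
        simp only [pvPopA]
        rw [if_pos hc, hhead, hS,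
            show pvS h (pvChain prev f (pvPAt prev t))
                  + (PySem.List.pyGet? h t).getD 0 * (t - pvPAt prev t)
                  - (PySem.List.pyGet? h t).getD 0 * (t - pvPAt prev t)
                = pvS h (pvChain prev f (pvPAt prev t)) from by ring]
        rw [hjump]
        have hjb := pvJumpB_bounds h prev hi f (pvPAt prev t) hg hpb.1 (fun h0 => by omega)
        rw [pvChain_fuel prev (f+1) f (pvJumpB h prev hi f (pvPAt prev t)) hg
              (fun h0 => ⟨by omega, by omega, by omega⟩)]
        exact ih (pvPAt prev t) hg hpb.1 (fun h0 => ⟨by omega, by omega⟩)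
      · have hjump : pvJumpB h prev hi (f+1) t = t := by
          simp only [pvJumpB]; rw [if_neg hc]
        rw [hjump, hchain]
        simp only [pvPopA]
        rw [if_neg hc]

-- prev-table construction facts
lemma pvPrevAux_succ (h : List Int) (k : Nat) :
    pvPrevAux h (k+1) = pvPrevAux h k ++
      [pvJumpB h (pvPrevAux h k) ((PySem.List.pyGet? h (k : Int)).getD 0) h.length ((k : Int) - 1)] := by
  unfold pvPrevAux
  rw [show ((k+1 : Nat) : Int) = (k : Int) + 1 by push_cast; ring,
      PySem.List.pyRange_one_succ_right (by omega), List.foldl_append]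
  rfl

lemma pvPrevAux_length (h : List Int) (k : Nat) : (pvPrevAux h k).length = k := by
  induction k with
  | zero => rfl
  | succ k ih => rw [pvPrevAux_succ]; simp [ih]

lemma pvPrevAux_good (h : List Int) (k : Nat) : pvGood (pvPrevAux h k) := by
  induction k with
  | zero => intro j hj; rw [pvPrevAux_length] at hj; omega
  | succ k ih =>
    intro j hj
    rw [pvPrevAux_length] at hj
    rw [pvPrevAux_succ]
    by_cases hjk : j < k
    · rw [pvPAt_append _ _ _ (by omega) (by rw [pvPrevAux_length]; omega)]
      exact ih j (by rw [pvPrevAux_length]; omega)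
    · have hjeq : j = k := by omega
      subst hjeq
      have hb := pvJumpB_bounds h (pvPrevAux h j) ((PySem.List.pyGet? h (j:Int)).getD 0)
        h.length ((j:Int)-1) ih (by omega) (fun h0 => by rw [pvPrevAux_length]; omega)
      have hval : pvPAt (pvPrevAux h j ++
          [pvJumpB h (pvPrevAux h j) ((PySem.List.pyGet? h (j:Int)).getD 0) h.length ((j:Int)-1)]) (j:Int)
          = pvJumpB h (pvPrevAux h j) ((PySem.List.pyGet? h (j:Int)).getD 0) h.length ((j:Int)-1) := by
        unfold pvPAt
        rw [show ((j:Int)) = (((pvPrevAux h j).length : Nat) : Int) by rw [pvPrevAux_length],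
            PySem.List.pyGet?_append_length]
        rfl
      rw [hval]
      omega

lemma pvPrevAux_prefix (h : List Int) (k m : Nat) (hkm : k ≤ m) :
    ∃ ext, pvPrevAux h m = pvPrevAux h k ++ ext := by
  induction m with
  | zero =>
    refine ⟨[], ?_⟩
    have : k = 0 := by omega
    rw [this, List.append_nil]
  | succ m ih =>
    by_cases hk : k = m + 1
    · subst hk; exact ⟨[], by simp⟩
    · obtain ⟨ext, hext⟩ := ih (by omega)
      exact ⟨ext ++ [pvJumpB h (pvPrevAux h m) ((PySem.List.pyGet? h (m:Int)).getD 0) h.length ((m:Int)-1)],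
        by rw [pvPrevAux_succ, hext, List.append_assoc]⟩

lemma pvPrevB_eq (h : List Int) : pvPrevB h = pvPrevAux h h.length := rfl

lemma pvPrevB_entry (h : List Int) (k : Nat) (hk : k < h.length) :
    pvPAt (pvPrevB h) (k : Int)
      = pvJumpB h (pvPrevB h) ((PySem.List.pyGet? h (k : Int)).getD 0) h.length ((k : Int) - 1) := by
  obtain ⟨ext, hext⟩ := pvPrevAux_prefix h (k+1) h.length (by omega)
  have hx : pvPrevB h = pvPrevAux h k ++
      (pvJumpB h (pvPrevAux h k) ((PySem.List.pyGet? h (k:Int)).getD 0) h.length ((k:Int)-1) :: ext) := by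
    rw [pvPrevB_eq, hext, pvPrevAux_succ, List.append_assoc, List.singleton_append]
  have hval : pvPAt (pvPrevB h) (k : Int)
      = pvJumpB h (pvPrevAux h k) ((PySem.List.pyGet? h (k:Int)).getD 0) h.length ((k:Int)-1) := by
    rw [hx]
    unfold pvPAt
    rw [show ((k:Int)) = (((pvPrevAux h k).length : Nat) : Int) by rw [pvPrevAux_length],
        PySem.List.pyGet?_append_length]
    rfl
  rw [hval]
  conv_rhs => rw [hx]
  exact (pvJumpB_append h (pvPrevAux h k) _ _ _ _ (pvPrevAux_good h k)
    (fun h0 => by rw [pvPrevAux_length]; omega)).symm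


lemma pvPrevB_good (h : List Int) : pvGood (pvPrevB h) := pvPrevAux_good h h.length

lemma pvPrevB_length (h : List Int) : (pvPrevB h).length = h.length := pvPrevAux_length h h.length

lemma pvChain_succ_k (h : List Int) (k : Nat) (hk : k < h.length) :
    pvChain (pvPrevB h) (h.length + 1) (k : Int)
      = (k : Int) :: pvChain (pvPrevB h) (h.length + 1) (pvPAt (pvPrevB h) (k : Int)) := by
  have hgood := pvPrevB_good h
  have hlen := pvPrevB_length h
  have hp := pvGood_at hgood (show (0:Int) ≤ (k:Int) by omega) (by rw [hlen]; omega)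
  have h1 : pvChain (pvPrevB h) (h.length + 1) (k : Int)
      = (k : Int) :: pvChain (pvPrevB h) h.length (pvPAt (pvPrevB h) (k : Int)) := by
    simp only [pvChain]; rw [if_pos (by omega : (0:Int) ≤ (k:Int))]
  rw [h1, pvChain_fuel (pvPrevB h) h.length (h.length+1) _ hgood
        (fun h0 => ⟨by omega, by omega, by omega⟩)]

lemma pvS_chain_succ (h : List Int) (k : Nat) (hk : k < h.length) :
    pvS h (pvChain (pvPrevB h) (h.length + 1) (k : Int))
      = pvS h (pvChain (pvPrevB h) (h.length + 1) (pvPAt (pvPrevB h) (k : Int)))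
        + (PySem.List.pyGet? h (k:Int)).getD 0 * ((k:Int) - pvPAt (pvPrevB h) (k:Int)) := by
  have hgood := pvPrevB_good h
  have hlen := pvPrevB_length h
  have hp := pvGood_at hgood (show (0:Int) ≤ (k:Int) by omega) (by rw [hlen]; omega)
  rw [pvChain_succ_k h k hk]
  exact pvS_chain_cons h (pvPrevB h) (h.length+1) (k:Int) _ hp.1 (fun h0 => by omega)

-- the value appended at step k, in closed form
lemma pvBAux_map (h : List Int) (k : Nat) (hk : k ≤ h.length) :
    pvBAux h (pvPrevB h) k
      = (List.range k).map (fun i : Nat => pvS h (pvChain (pvPrevB h) (h.length + 1) (i : Int))) := by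
  revert hk
  induction k with
  | zero => intro _; rfl
  | succ k ih =>
    intro hk
    have hkn : k < h.length := by omega
    have hgood := pvPrevB_good h
    have hlen := pvPrevB_length h
    have hp := pvGood_at hgood (show (0:Int) ≤ (k:Int) by omega) (by rw [hlen]; omega)
    have hsucc : pvBAux h (pvPrevB h) (k+1)
        = pvStepDp h (pvPrevB h) (pvBAux h (pvPrevB h) k) (k : Int) := by
      unfold pvBAux
      rw [show ((k+1:Nat):Int) = (k:Int)+1 by push_cast; ring,
          PySem.List.pyRange_one_succ_right (by omega), List.foldl_append]
      rfl
    rw [hsucc, ih (by omega)]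
    simp only [pvStepDp, pvPAt_def]
    rw [List.range_succ, List.map_append]
    simp only [List.map_cons, List.map_nil]
    congr 1
    rw [pvS_chain_succ h k hkn]
    by_cases hp0 : pvPAt (pvPrevB h) (k:Int) ≥ 0
    · rw [if_pos hp0]
      have hptn : (pvPAt (pvPrevB h) (k:Int)).toNat < k := by omega
      rw [PySem.List.pyGet?_of_nonneg _ hp0, List.getElem?_map, List.getElem?_range hptn]
      simp only [Option.map_some, Option.getD_some]
      rw [Int.toNat_of_nonneg hp0]
    · rw [if_neg hp0]
      rw [show pvPAt (pvPrevB h) (k:Int) = -1 by omega]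
      rw [pvChain_neg _ _ _ (by norm_num)]
      rfl

lemma pvAAux_inv (h : List Int) (k : Nat) (hk : k ≤ h.length) :
    pvAAux h k = (pvChain (pvPrevB h) (h.length + 1) ((k : Int) - 1),
                  pvS h (pvChain (pvPrevB h) (h.length + 1) ((k : Int) - 1)),
                  pvBAux h (pvPrevB h) k) := by
  revert hk
  induction k with
  | zero => intro _; rfl
  | succ k ih =>
    intro hk
    have hkn : k < h.length := by omega
    have hgood := pvPrevB_good h
    have hlen := pvPrevB_length h
    have hp := pvGood_at hgood (show (0:Int) ≤ (k:Int) by omega) (by rw [hlen]; omega)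
    have hsucc : pvAAux h (k+1) = pvStepA h (pvAAux h k) (k:Int) := by
      unfold pvAAux
      rw [show ((k+1:Nat):Int) = (k:Int)+1 by push_cast; ring,
          PySem.List.pyRange_one_succ_right (by omega), List.foldl_append]
      rfl
    rw [hsucc, ih (by omega)]
    have hpop := pvPopA_chain h (pvPrevB h) ((PySem.List.pyGet? h (k:Int)).getD 0)
      (h.length+1) ((k:Int)-1) hgood (by omega)
      (fun h0 => ⟨by omega, by omega⟩)
    have hfuel := pvJumpB_fuel h (pvPrevB h) ((PySem.List.pyGet? h (k:Int)).getD 0)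
      (h.length+1) h.length ((k:Int)-1) hgood (fun h0 => ⟨by omega, by omega, by omega⟩)
    have hentry := pvPrevB_entry h k hkn
    have hj : pvJumpB h (pvPrevB h) ((PySem.List.pyGet? h (k:Int)).getD 0) (h.length+1) ((k:Int)-1)
        = pvPAt (pvPrevB h) (k:Int) := by rw [hfuel, ← hentry]
    rw [hj] at hpop
    have hhead := pvChain_headD (pvPrevB h) (h.length+1) (pvPAt (pvPrevB h) (k:Int)) hp.1
      (fun h0 => by omega)
    simp only [pvStepA]
    rw [hpop]
    dsimp only
    rw [hhead, show ((k+1:Nat):Int) - 1 = (k:Int) by push_cast; ring]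
    simp only [Prod.mk.injEq]
    refine ⟨(pvChain_succ_k h k hkn).symm, (pvS_chain_succ h k hkn).symm, ?_⟩
    rw [pvBAux_map h (k+1) (by omega), pvBAux_map h k (by omega),
        List.range_succ, List.map_append]
    simp only [List.map_cons, List.map_nil]
    rw [pvS_chain_succ h k hkn]

-- ===== VERDICT (by name: the statement is the Claim_ definition above) =====
theorem beautifulTowersPrefixSum_spec : Claim_equal_beautifulTowersPrefixSum := by
  intro h _
  show _ = _
  have := pvAAux_inv h h.length le_rfl
  show (pvAAux h h.length).2.2 = pvBAux h (pvPrevB h) h.length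
  rw [this]
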